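-- pv_equiv track=rewrite | github.com/sushilb404/llm_cultural_debate | scripts/analyze_model_role.py | infer_prediction_field
-- ===== SOURCE A (Python) =====
-- REQUIRED_KEYS = {"Country", "Story", "Rule-of-Thumb", "Gold Label"}
--
-- def infer_prediction_field(sample: dict) -> str:
--     candidate_fields = [key for key in sample if key not in REQUIRED_KEYS and key not in {"error", "model_id"}]
--     finals = [key for key in candidate_fields if key.endswith("_final")]
--     if finals:
--         return finals[0]
--     if len(candidate_fields) == 1:
--         return candidate_fields[0]
--     if candidate_fields:
--         return candidate_fields[0]
--     raise ValueError("Could not infer prediction field from input file.")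
-- ===== SOURCE B (Python) =====
-- REQUIRED_KEYS = {"Country", "Story", "Rule-of-Thumb", "Gold Label"}
--
-- def infer_prediction_field(sample: dict) -> str:
--     first_candidate = None
--     for key in sample:
--         if key in REQUIRED_KEYS or key in ("error", "model_id"):
--             continue
--         if key.endswith("_final"):
--             return key
--         if first_candidate is None:
--             first_candidate = key
--     if first_candidate is not None:
--         return first_candidate
--     raise ValueError("Could not infer prediction field from input file.")
-- ===== Notes on version B (the rewrite author's own statement) =====
-- stated objective: simpler
-- what changed: Replaces the two list comprehensions (all candidates, then all '_final' candidates) with a single pass that returns at the first '_final' candidate and otherwise remembers only the first candidate seen.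
import Mathlib
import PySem

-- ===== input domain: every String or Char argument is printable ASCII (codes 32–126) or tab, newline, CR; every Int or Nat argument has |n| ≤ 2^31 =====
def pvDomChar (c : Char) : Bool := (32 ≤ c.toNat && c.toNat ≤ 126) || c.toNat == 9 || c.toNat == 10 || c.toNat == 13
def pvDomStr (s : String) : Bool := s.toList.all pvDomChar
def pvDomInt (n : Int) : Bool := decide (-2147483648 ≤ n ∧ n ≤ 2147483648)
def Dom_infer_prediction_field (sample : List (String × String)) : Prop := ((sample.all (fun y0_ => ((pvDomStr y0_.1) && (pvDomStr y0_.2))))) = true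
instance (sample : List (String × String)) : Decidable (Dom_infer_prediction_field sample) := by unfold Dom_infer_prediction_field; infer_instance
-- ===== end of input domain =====

-- B replaces A's two list comprehensions by one pass that returns at the first '_final'
-- candidate and otherwise remembers only the first candidate seen (objective: simpler).

-- key in REQUIRED_KEYS or key in {"error", "model_id"}
def pvExcluded (k : String) : Bool :=
  ["Country", "Story", "Rule-of-Thumb", "Gold Label"].contains k ||
  ["error", "model_id"].contains k

-- ===== PORT A =====
def infer_prediction_field (sample : List (String × String)) : String :=
  let candidate_fields := (sample.map Prod.fst).filter (fun k => !pvExcluded k)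
  let finals := candidate_fields.filter (fun k => PySem.Str.endswith k "_final")
  match finals with
  | f :: _ => f
  | [] =>
    match candidate_fields with
    | c :: _ => c
    | [] => ""   -- A raises ValueError here; excluded by Pre_

-- ===== PORT B =====
def pvGoB (l : List (String × String)) (firstCand : Option String) : String :=
  match l with
  | [] =>
    match firstCand with
    | some c => c
    | none => ""   -- B raises ValueError here; excluded by Pre_
  | (k, _) :: rest =>
    if pvExcluded k then pvGoB rest firstCand
    else if PySem.Str.endswith k "_final" then k
    else
      match firstCand with
      | some _ => pvGoB rest firstCand
      | none => pvGoB rest (some k)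

def infer_prediction_field_alt (sample : List (String × String)) : String :=
  pvGoB sample none

-- ===== PRECONDITION & SPEC =====
-- A (and B) raise ValueError exactly when the sample has no candidate key.
def Pre_infer_prediction_field (sample : List (String × String)) : Prop :=
  sample.any (fun p => !pvExcluded p.1) = true
instance (sample : List (String × String)) : Decidable (Pre_infer_prediction_field sample) := by
  unfold Pre_infer_prediction_field; infer_instance

def pvWitness_infer_prediction_field : (List (String × String)) := [("pred_final", "yes")]

def Spec_infer_prediction_field (sample : List (String × String)) (out : String) : Prop := out = infer_prediction_field_alt sample
instance (sample : List (String × String)) (out : String) : Decidable (Spec_infer_prediction_field sample out) := by unfold Spec_infer_prediction_field; infer_instance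

-- ===== CLAIM (what is proved, stated in full; the proofs are below) =====
def Claim_equal_infer_prediction_field : Prop := ∀ (sample : List (String × String)), Dom_infer_prediction_field sample → Pre_infer_prediction_field sample → Spec_infer_prediction_field sample (infer_prediction_field sample)

-- ===== LEMMAS AND PROOFS =====

-- Loop invariant: pvGoB l acc = first '_final' candidate of l, else acc, else first candidate of l, else "".
theorem pvGoB_eq (l : List (String × String)) (acc : Option String) :
    pvGoB l acc =
      match ((l.map Prod.fst).filter (fun k => !pvExcluded k)).filter
              (fun k => PySem.Str.endswith k "_final") with
      | f :: _ => f
      | [] =>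
        match acc with
        | some c => c
        | none =>
          match (l.map Prod.fst).filter (fun k => !pvExcluded k) with
          | c :: _ => c
          | [] => "" := by
  induction l generalizing acc with
  | nil => cases acc <;> simp [pvGoB]
  | cons p rest ih =>
    obtain ⟨k, v⟩ := p
    by_cases hx : pvExcluded k
    · simp [pvGoB, hx, ih]
    · by_cases hf : PySem.Chars.endswith k.toList ['_', 'f', 'i', 'n', 'a', 'l'] = true
      · simp [pvGoB, hx, hf, List.filter_filter]
      · cases acc with
        | some c => simp [pvGoB, hx, hf, ih, List.filter_filter]
        | none => simp [pvGoB, hx, hf, ih, List.filter_filter]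

-- ===== VERDICT (by name: the statement is the Claim_ definition above) =====
theorem infer_prediction_field_spec : Claim_equal_infer_prediction_field := by
  intro sample _ _
  unfold Spec_infer_prediction_field infer_prediction_field infer_prediction_field_alt
  rw [pvGoB_eq]
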